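-- pv_equiv track=rewrite | github.com/cy-suite/paddlepaddle-new | python/paddle/distributed/auto_parallel/static/utils.py | compute_compatible_dim_mapping
-- ===== SOURCE A (Python) =====
-- def compute_compatible_dim_mapping(dim_mappings):
--     if not dim_mappings:
--         return None
--     compatible_mapping = dim_mappings[0]
--     for mapping in dim_mappings:
--         if compatible_mapping == -1:
--             compatible_mapping = mapping
--         elif mapping == -1:
--             continue
--         elif compatible_mapping == mapping:
--             continue
--         else:
--             return None
--     return compatible_mapping
-- ===== SOURCE B (Python) =====
-- def compute_compatible_dim_mapping(dim_mappings):
--     if not dim_mappings: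
--         return None
--     vals = {m for m in dim_mappings if m != -1}
--     if not vals:
--         return -1
--     if len(vals) == 1:
--         return next(iter(vals))
--     return None
-- ===== Notes on version B (the rewrite author's own statement) =====
-- stated objective: simpler
-- what changed: Replaces the running-reduce scan with stateful branching by building the set of distinct non-(-1) values once and branching on its cardinality (0 -> -1, 1 -> that value, >=2 -> None).
import Mathlib
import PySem

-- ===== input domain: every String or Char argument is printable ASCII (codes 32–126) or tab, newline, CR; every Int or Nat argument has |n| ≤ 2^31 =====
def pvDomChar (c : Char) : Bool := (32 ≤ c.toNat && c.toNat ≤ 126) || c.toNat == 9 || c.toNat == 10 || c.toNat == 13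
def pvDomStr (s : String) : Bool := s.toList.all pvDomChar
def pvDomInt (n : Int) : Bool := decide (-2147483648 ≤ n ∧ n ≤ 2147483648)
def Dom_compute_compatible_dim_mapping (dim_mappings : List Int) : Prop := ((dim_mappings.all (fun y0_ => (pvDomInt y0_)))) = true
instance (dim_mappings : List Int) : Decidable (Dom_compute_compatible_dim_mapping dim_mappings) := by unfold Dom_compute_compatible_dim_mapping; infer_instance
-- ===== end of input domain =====

-- B replaces A's running-reduce scan by one set comprehension plus a cardinality branch (objective: simpler).


-- ===== PORT A =====
-- A's for-loop over dim_mappings with the running accumulator compatible_mapping;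
-- 'return None' inside the loop becomes the none branch.
def ccdmLoopA (compatible_mapping : Int) (l : List Int) : Option Int :=
  match l with
  | [] => some compatible_mapping
  | mapping :: rest =>
    if compatible_mapping = -1 then ccdmLoopA mapping rest
    else if mapping = -1 then ccdmLoopA compatible_mapping rest
    else if compatible_mapping = mapping then ccdmLoopA compatible_mapping rest
    else none

def compute_compatible_dim_mapping (dim_mappings : List Int) : Option Int :=
  match dim_mappings with
  | [] => none
  | h :: _ => ccdmLoopA h dim_mappings

-- ===== PORT B =====
def compute_compatible_dim_mapping_alt (dim_mappings : List Int) : Option Int :=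
  if dim_mappings.isEmpty then none
  else
    match PySem.Set.ofList (dim_mappings.filter (fun m => m ≠ -1)) with
    | [] => some (-1)          -- empty set: every entry was -1
    | [v] => some v            -- len(vals) == 1: next(iter(vals))
    | _ => none                -- two or more distinct values

-- ===== PRECONDITION & SPEC =====
def Spec_compute_compatible_dim_mapping (dim_mappings : List Int) (out : Option Int) : Prop := out = compute_compatible_dim_mapping_alt dim_mappings
instance (dim_mappings : List Int) (out : Option Int) : Decidable (Spec_compute_compatible_dim_mapping dim_mappings out) := by unfold Spec_compute_compatible_dim_mapping; infer_instance

-- ===== CLAIM (what is proved, stated in full; the proofs are below) =====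
def Claim_equal_compute_compatible_dim_mapping : Prop := ∀ (dim_mappings : List Int), Dom_compute_compatible_dim_mapping dim_mappings → Spec_compute_compatible_dim_mapping dim_mappings (compute_compatible_dim_mapping dim_mappings)

-- ===== LEMMAS AND PROOFS =====

-- the set-then-cardinality value B computes from a given list of candidates
def ccdmSet (l : List Int) : Option Int :=
  match PySem.Set.ofList (l.filter (fun m => m ≠ -1)) with
  | [] => some (-1)
  | [v] => some v
  | _ => none

theorem foldl_add_prefix (l : List Int) (s : PySem.Set Int) :
    ∃ t, List.foldl PySem.Set.add s l = s ++ t := by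
  induction l generalizing s with
  | nil => exact ⟨[], by simp⟩
  | cons x l ih =>
    simp only [List.foldl_cons, PySem.Set.add]
    by_cases hx : PySem.Set.contains s x
    · rw [if_pos hx]; exact ih s
    · rw [if_neg hx]
      obtain ⟨t, ht⟩ := ih (s ++ [x])
      exact ⟨x :: t, by simpa using ht⟩

theorem ofList_cons_dup (c : Int) (l : List Int) :
    PySem.Set.ofList (c :: c :: l) = PySem.Set.ofList (c :: l) := by
  simp [PySem.Set.ofList_eq_foldl, PySem.Set.add, PySem.Set.contains]

-- characterisation of A's loop: its result is B's set-cardinality computation on c :: l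
theorem ccdmLoopA_eq_set (l : List Int) (c : Int) :
    ccdmLoopA c l = ccdmSet (c :: l) := by
  induction l generalizing c with
  | nil =>
    by_cases hc : c = -1 <;>
      simp [ccdmLoopA, ccdmSet, hc, PySem.Set.ofList_eq_foldl, PySem.Set.add, PySem.Set.contains]
  | cons m rest ih =>
    by_cases hc : c = -1
    · subst hc
      have h1 : ccdmLoopA (-1) (m :: rest) = ccdmLoopA m rest := by simp [ccdmLoopA]
      have h2 : ccdmSet ((-1 : Int) :: m :: rest) = ccdmSet (m :: rest) := by
        unfold ccdmSet
        have hf : ((-1 : Int) :: m :: rest).filter (fun m => m ≠ -1)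
            = (m :: rest).filter (fun m => m ≠ -1) := by simp
        rw [hf]
      rw [h1, h2, ih m]
    · by_cases hm : m = -1
      · subst hm
        have h1 : ccdmLoopA c ((-1 : Int) :: rest) = ccdmLoopA c rest := by
          simp [ccdmLoopA, hc]
        have h2 : ccdmSet (c :: (-1 : Int) :: rest) = ccdmSet (c :: rest) := by
          unfold ccdmSet
          have hf : (c :: (-1 : Int) :: rest).filter (fun m => m ≠ -1)
              = (c :: rest).filter (fun m => m ≠ -1) := by simp [hc]
          rw [hf]
        rw [h1, h2, ih c]
      · by_cases hcm : c = m
        · subst hcm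
          have h1 : ccdmLoopA c (c :: rest) = ccdmLoopA c rest := by simp [ccdmLoopA, hc]
          have h2 : ccdmSet (c :: c :: rest) = ccdmSet (c :: rest) := by
            unfold ccdmSet
            have hf : (c :: c :: rest).filter (fun m => m ≠ -1)
                = c :: c :: rest.filter (fun m => m ≠ -1) := by simp [hc]
            have hf2 : (c :: rest).filter (fun m => m ≠ -1)
                = c :: rest.filter (fun m => m ≠ -1) := by simp [hc]
            rw [hf, hf2, ofList_cons_dup]
          rw [h1, h2, ih c]
        · have h1 : ccdmLoopA c (m :: rest) = none := by
            simp [ccdmLoopA, hc, hm, hcm]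
          obtain ⟨t, ht⟩ : ∃ t, PySem.Set.ofList ((c :: m :: rest).filter (fun m => m ≠ -1))
              = c :: m :: t := by
            have hf : (c :: m :: rest).filter (fun m => m ≠ -1)
                = c :: m :: rest.filter (fun m => m ≠ -1) := by simp [hc, hm]
            rw [hf, PySem.Set.ofList_eq_foldl]
            simp only [List.foldl_cons]
            have ha : PySem.Set.add ([] : PySem.Set Int) c = [c] := by
              simp [PySem.Set.add, PySem.Set.contains]
            have hb : PySem.Set.add [c] m = [c, m] := by
              simp [PySem.Set.add, PySem.Set.contains, Ne.symm hcm]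
            rw [ha, hb]
            simpa using foldl_add_prefix (rest.filter (fun m => m ≠ -1)) [c, m]
          rw [h1]
          unfold ccdmSet
          rw [ht]

-- ===== VERDICT (by name: the statement is the Claim_ definition above) =====
theorem compute_compatible_dim_mapping_spec : Claim_equal_compute_compatible_dim_mapping := by
  intro dim_mappings _
  unfold Spec_compute_compatible_dim_mapping
  cases dim_mappings with
  | nil => rfl
  | cons h t =>
    -- A's first loop iteration compares h with itself and keeps the state, so it reduces to the tail
    have hfirst : ccdmLoopA h (h :: t) = ccdmLoopA h t := by
      by_cases hh : h = -1 <;> simp [ccdmLoopA, hh]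
    have := ccdmLoopA_eq_set t h
    simp [compute_compatible_dim_mapping, compute_compatible_dim_mapping_alt,
      hfirst, this, ccdmSet]
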